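-- pv_equiv track=rewrite | github.com/maxim2204/Pytest | 1203b.py | palka
-- ===== SOURCE A (Python) =====
-- def palka(spisok2):
--     spisok = spisok2[:]
--     n = len(spisok)
--     for i in spisok:
--         if spisok.count(i)%2 != 0:
--             return False
--     finish = []
--     for i in range(n//4):
--         x1 = min(spisok)
--         x2 = max(spisok)
--         finish.append((x1,x2))
--         spisok.remove(x1)
--         spisok.remove(x1)
--         spisok.remove(x2)
--         spisok.remove(x2)
--     s = finish[0][0] * finish[0][1]
--     for i in range(len(finish)):
--         if s != finish[i][0] * finish[i][1]:
--             return False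
--     return True
-- ===== SOURCE B (Python) =====
-- def palka(spisok2):
--     counts = {}
--     for v in spisok2:
--         counts[v] = counts.get(v, 0) + 1
--     if any(c % 2 != 0 for c in counts.values()):
--         return False
--     s = sorted(spisok2)
--     n = len(s)
--     target = s[0] * s[n - 1]
--     return all(s[2 * i] * s[n - 1 - 2 * i] == target for i in range(n // 4))
-- ===== Notes on version B (the rewrite author's own statement) =====
-- stated objective: alternative
-- what changed: B replaces A's per-element count pass and its repeated min/max scans with four list.remove calls per round by one dict-counter pass plus a single sort with direct index pairing s[2i]*s[n-1-2i].
import Mathlib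
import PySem

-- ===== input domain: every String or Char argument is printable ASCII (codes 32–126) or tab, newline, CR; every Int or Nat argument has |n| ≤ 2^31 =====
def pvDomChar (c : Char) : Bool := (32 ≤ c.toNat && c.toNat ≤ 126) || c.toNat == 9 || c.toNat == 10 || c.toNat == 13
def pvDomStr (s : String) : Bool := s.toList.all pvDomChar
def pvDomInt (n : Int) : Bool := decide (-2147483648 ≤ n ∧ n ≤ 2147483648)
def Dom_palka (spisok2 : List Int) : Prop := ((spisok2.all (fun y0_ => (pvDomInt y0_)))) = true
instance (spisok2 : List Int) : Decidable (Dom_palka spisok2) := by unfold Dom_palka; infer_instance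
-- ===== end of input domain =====

-- B replaces A's repeated min/max-removal rounds with one sort and direct index pairing; equal on Pre_ (A raises IndexError on [] and [x,x]).


-- ===== PORT A =====
-- one iteration of A's 'for i in range(n//4)' body; Python list.remove raises ValueError
-- when the element is absent, but min/max of the list are always present, where remove = List.erase
def palkaStep (st : List Int × List (Int × Int)) : List Int × List (Int × Int) :=
  let x1 := (PySem.List.min? st.1 (fun y => y)).getD 0   -- min(spisok); empty list unreachable under Pre_palka
  let x2 := (PySem.List.max? st.1 (fun y => y)).getD 0   -- max(spisok)
  ((((st.1.erase x1).erase x1).erase x2).erase x2, st.2 ++ [(x1, x2)])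

def palka (spisok2 : List Int) : Bool :=
  let spisok := spisok2
  let n := spisok.length
  if spisok.any (fun i => PySem.List.count spisok i % 2 != 0) then false
  else
    let st := (List.range (n / 4)).foldl (fun st _ => palkaStep st) (spisok, [])
    match st.2 with
    | [] => false            -- Python: finish[0] raises IndexError here; excluded by Pre_palka
    | f0 :: _ =>
      let s := f0.1 * f0.2
      if st.2.any (fun p => s != p.1 * p.2) then false else true

-- ===== PORT B =====
def palka_alt (spisok2 : List Int) : Bool :=
  let counts := spisok2.foldl (fun d v => d.insert v (d.getD v 0 + 1)) (PySem.Dict.empty : PySem.Dict Int Int)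
  if counts.values.any (fun c => c % 2 != 0) then false
  else
    let s := PySem.List.sorted spisok2 (fun y => y)
    let n := s.length
    let target := s.getD 0 0 * s.getD (n - 1) 0   -- s[0] raises IndexError on []; excluded by Pre_palka
    (List.range (n / 4)).all (fun i => s.getD (2 * i) 0 * s.getD (n - 1 - 2 * i) 0 == target)

-- ===== PRECONDITION & SPEC =====
-- Pre_ excludes exactly the inputs where A raises IndexError: the empty list and two-element
-- lists [x,x] (all counts even but finish stays empty, so finish[0] raises).
def Pre_palka (spisok2 : List Int) : Prop :=
  spisok2 ≠ [] ∧ ¬(spisok2.length = 2 ∧ spisok2.getD 0 0 = spisok2.getD 1 0)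
instance (spisok2 : List Int) : Decidable (Pre_palka spisok2) := by unfold Pre_palka; infer_instance
def pvWitness_palka : List Int := [1, 1, 2, 2]


def Spec_palka (spisok2 : List Int) (out : Bool) : Prop := out = palka_alt spisok2
instance (spisok2 : List Int) (out : Bool) : Decidable (Spec_palka spisok2 out) := by unfold Spec_palka; infer_instance

-- ===== CLAIM (what is proved, stated in full; the proofs are below) =====
def Claim_equal_palka : Prop := ∀ (spisok2 : List Int), Dom_palka spisok2 → Pre_palka spisok2 → Spec_palka spisok2 (palka spisok2)

-- ===== LEMMAS AND PROOFS =====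

-- the sorted copy B works on
def srt (l : List Int) : List Int := PySem.List.sorted l (fun y => y)
-- multiset of A's working list after k iterations: the slice s[2k : n-2k] of the sorted list
def mid (l : List Int) (k : Nat) : List Int := ((srt l).drop (2 * k)).take (l.length - 4 * k)

lemma length_srt (l : List Int) : (srt l).length = l.length := PySem.List.length_sorted l _ _

lemma srt_mono (l : List Int) {p q : Nat} (hpq : p ≤ q) (hq : q < l.length) :
    (srt l).getD p 0 ≤ (srt l).getD q 0 := by
  have hq' : q < (srt l).length := by rw [length_srt]; exact hq
  rw [List.getD_eq_getElem _ _ (lt_of_le_of_lt hpq hq'), List.getD_eq_getElem _ _ hq']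
  exact PySem.List.sorted_id_getElem_mono l hpq hq'

lemma length_mid (l : List Int) (k : Nat) (hk : 4 * k ≤ l.length) :
    (mid l k).length = l.length - 4 * k := by
  simp [mid, length_srt]
  omega

lemma getElem_mid (l : List Int) (k j : Nat) (h : j < (mid l k).length)
    (hk : 4 * k ≤ l.length) : (mid l k)[j] = (srt l).getD (2 * k + j) 0 := by
  have hlen := length_mid l k hk
  have hj : 2 * k + j < (srt l).length := by rw [length_srt]; omega
  rw [List.getD_eq_getElem _ _ hj]
  simp [mid, List.getElem_take, List.getElem_drop]

lemma mid_zero (l : List Int) : mid l 0 = srt l := by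
  simp [mid, length_srt]

-- a sorted slice with all-even counts splits as a,a, core, b,b
lemma mid_decomp (l : List Int) (k : Nat) (h4 : 4 * (k + 1) ≤ l.length)
    (hevk : ∀ v, (mid l k).count v % 2 = 0) :
    mid l k = (srt l).getD (2 * k) 0 :: (srt l).getD (2 * k) 0 ::
      (mid l (k + 1) ++ [(srt l).getD (l.length - 1 - 2 * k) 0, (srt l).getD (l.length - 1 - 2 * k) 0]) := by
  have hk : 4 * k ≤ l.length := by omega
  have hm : (mid l k).length = l.length - 4 * k := length_mid l k hk
  have hm1 : (mid l (k + 1)).length = l.length - 4 * (k + 1) := length_mid l (k + 1) h4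
  have key : ∀ j (hj : j < (mid l k).length), (mid l k)[j] = (srt l).getD (2 * k + j) 0 :=
    fun j hj => getElem_mid l k j hj hk
  -- abbreviations
  have h0 : 0 < (mid l k).length := by omega
  have hmono : ∀ p q : Nat, p ≤ q → q < l.length → (srt l).getD p 0 ≤ (srt l).getD q 0 :=
    fun p q h1 h2 => srt_mono l h1 h2
  -- e1 : the second element of the slice equals the first
  have e1 : (srt l).getD (2 * k + 1) 0 = (srt l).getD (2 * k) 0 := by
    obtain ⟨x, rest, hx⟩ : ∃ x rest, mid l k = x :: rest := by
      rcases hmm : mid l k with _ | ⟨x, rest⟩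
      · rw [hmm] at h0; simp at h0
      · exact ⟨x, rest, rfl⟩
    have hx0 : x = (srt l).getD (2 * k) 0 := by
      have := key 0 h0
      simp only [hx] at this
      simpa using this
    have hca : (mid l k).count ((srt l).getD (2 * k) 0) % 2 = 0 := hevk _
    rw [hx, hx0, List.count_cons_self] at hca
    have hmemr : (srt l).getD (2 * k) 0 ∈ rest := by
      by_contra hc
      rw [List.count_eq_zero_of_not_mem hc] at hca
      omega
    obtain ⟨jr, hjr, hjre⟩ := List.mem_iff_getElem.mp hmemr
    have hjr1 : jr + 1 < (mid l k).length := by rw [hx]; simpa using hjr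
    have hmid_jr : (mid l k)[jr + 1]'hjr1 = (srt l).getD (2 * k) 0 := by
      simp only [hx, List.getElem_cons_succ]; exact hjre
    have hge : (srt l).getD (2 * k) 0 ≤ (srt l).getD (2 * k + 1) 0 :=
      hmono _ _ (by omega) (by omega)
    have hle : (srt l).getD (2 * k + 1) 0 ≤ (srt l).getD (2 * k) 0 := by
      have h1 : (srt l).getD (2 * k + 1) 0 ≤ (srt l).getD (2 * k + (jr + 1)) 0 :=
        hmono _ _ (by omega) (by omega)
      rw [← key (jr + 1) hjr1, hmid_jr] at h1
      exact h1
    exact le_antisymm hle hge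
  -- e2 : the second-to-last element of the slice equals the last
  have e2 : (srt l).getD (l.length - 2 - 2 * k) 0 = (srt l).getD (l.length - 1 - 2 * k) 0 := by
    have hne : mid l k ≠ [] := by intro hc; rw [hc] at h0; simp at h0
    have hlast : (mid l k).getLast hne = (srt l).getD (l.length - 1 - 2 * k) 0 := by
      rw [List.getLast_eq_getElem, key _ (by omega)]
      congr 1
      omega
    have hsplit := List.dropLast_append_getLast hne
    have hcb : (mid l k).count ((srt l).getD (l.length - 1 - 2 * k) 0) % 2 = 0 := hevk _
    rw [← hsplit, hlast, List.count_append, List.count_singleton] at hcb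
    have hmemd : (srt l).getD (l.length - 1 - 2 * k) 0 ∈ (mid l k).dropLast := by
      by_contra hc
      rw [List.count_eq_zero_of_not_mem hc] at hcb
      simp at hcb
    obtain ⟨jr, hjr, hjre⟩ := List.mem_iff_getElem.mp hmemd
    have hjr' : jr < (mid l k).length := by
      rw [List.length_dropLast] at hjr; omega
    have hjrlt : jr < (mid l k).length - 1 := by
      rw [List.length_dropLast] at hjr; omega
    have hmid_jr : (mid l k)[jr]'hjr' = (srt l).getD (l.length - 1 - 2 * k) 0 := by
      rw [← hjre, List.getElem_dropLast]
    have hge : (srt l).getD (l.length - 1 - 2 * k) 0 ≤ (srt l).getD (l.length - 2 - 2 * k) 0 := by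
      have h1 : (srt l).getD (2 * k + jr) 0 ≤ (srt l).getD (l.length - 2 - 2 * k) 0 :=
        hmono _ _ (by omega) (by omega)
      rw [← key jr hjr', hmid_jr] at h1
      exact h1
    have hle : (srt l).getD (l.length - 2 - 2 * k) 0 ≤ (srt l).getD (l.length - 1 - 2 * k) 0 :=
      hmono _ _ (by omega) (by omega)
    exact le_antisymm hle hge
  -- the list equality, index by index
  apply List.ext_getElem
  · simp only [hm, List.length_cons, List.length_append, hm1, List.length_nil]
    omega
  · intro j hj hj2
    rw [getElem_mid l k j hj hk]
    rw [hm] at hj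
    match j with
    | 0 => simpa using rfl
    | 1 => simpa using e1
    | (j + 2) =>
      simp only [List.getElem_cons_succ]
      by_cases hj' : j < (mid l (k + 1)).length
      · rw [List.getElem_append_left hj', getElem_mid l (k + 1) j hj' h4]
        congr 1
        omega
      · rw [hm1] at hj'
        rw [List.getElem_append_right (by rw [hm1]; omega)]
        rcases (by omega : j = l.length - 4 * (k + 1) ∨ j = l.length - 4 * (k + 1) + 1) with hj3 | hj3
        · have hd : j - (mid l (k + 1)).length = 0 := by rw [hm1]; omega
          simp only [hd, List.getElem_cons_zero]
          rw [show 2 * k + (j + 2) = l.length - 2 - 2 * k from by omega]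
          exact e2
        · have hd : j - (mid l (k + 1)).length = 1 := by rw [hm1]; omega
          simp only [hd, List.getElem_cons_succ, List.getElem_cons_zero]
          congr 1
          omega

lemma mid_even (l : List Int) (hev : ∀ v, l.count v % 2 = 0) :
    ∀ k, 4 * k ≤ l.length → ∀ v, (mid l k).count v % 2 = 0 := by
  intro k
  induction k with
  | zero =>
    intro _ v
    rw [mid_zero]
    unfold srt
    rw [(PySem.List.sorted_perm l (fun y => y) false).count_eq v]
    exact hev v
  | succ k ih =>
    intro hk v
    have hk' : 4 * k ≤ l.length := by omega
    have hd := mid_decomp l k (by omega) (ih hk')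
    have := ih hk' v
    rw [hd] at this
    simp [List.count_cons, List.count_append] at this ⊢
    omega

lemma loop_inv (l : List Int) (hev : ∀ v, l.count v % 2 = 0) :
    ∀ k, 4 * k ≤ l.length → ∃ L : List Int,
      (List.range k).foldl (fun st _ => palkaStep st) (l, []) =
        (L, (List.range k).map (fun i => ((srt l).getD (2 * i) 0, (srt l).getD (l.length - 1 - 2 * i) 0)))
      ∧ L.Perm (mid l k) := by
  intro k
  induction k with
  | zero =>
    intro _
    refine ⟨l, by simp, ?_⟩
    rw [mid_zero]
    exact (PySem.List.sorted_perm l (fun y => y) false).symm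
  | succ k ih =>
    intro hk
    obtain ⟨L, hfold, hperm⟩ := ih (by omega)
    have hstep : (List.range (k + 1)).foldl (fun st _ => palkaStep st) (l, []) =
        palkaStep ((List.range k).foldl (fun st _ => palkaStep st) (l, [])) := by
      rw [List.range_succ, List.foldl_append]
      rfl
    have hevk := mid_even l hev k (by omega)
    have hd := mid_decomp l k hk hevk
    have hm : (mid l k).length = l.length - 4 * k := length_mid l k (by omega)
    have hbound : ∀ y ∈ L, (srt l).getD (2 * k) 0 ≤ y ∧ y ≤ (srt l).getD (l.length - 1 - 2 * k) 0 := by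
      intro y hy
      obtain ⟨j, hj, hje⟩ := List.mem_iff_getElem.mp (hperm.mem_iff.mp hy)
      rw [← hje, getElem_mid l k j hj (by omega)]
      rw [hm] at hj
      exact ⟨srt_mono l (by omega) (by omega), srt_mono l (by omega) (by omega)⟩
    have haL : (srt l).getD (2 * k) 0 ∈ L := by
      apply hperm.mem_iff.mpr
      rw [hd]
      exact List.mem_cons_self ..
    have hbL : (srt l).getD (l.length - 1 - 2 * k) 0 ∈ L := by
      apply hperm.mem_iff.mpr
      rw [hd]
      simp
    have hmin : (PySem.List.min? L (fun y => y)).getD 0 = (srt l).getD (2 * k) 0 := by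
      rcases hminE : PySem.List.min? L (fun y => y) with _ | m0
      · rw [PySem.List.min?_eq_none_iff] at hminE
        rw [hminE] at haL
        simp at haL
      · have h1 : m0 ≤ (srt l).getD (2 * k) 0 := PySem.List.min?_isMin hminE _ haL
        have h2 := (hbound m0 (PySem.List.min?_mem hminE)).1
        simpa using le_antisymm h1 h2
    have hmax : (PySem.List.max? L (fun y => y)).getD 0 = (srt l).getD (l.length - 1 - 2 * k) 0 := by
      rcases hmaxE : PySem.List.max? L (fun y => y) with _ | m0
      · rw [PySem.List.max?_eq_none_iff] at hmaxE
        rw [hmaxE] at haL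
        simp at haL
      · have h1 : (srt l).getD (l.length - 1 - 2 * k) 0 ≤ m0 := PySem.List.max?_isMax hmaxE _ hbL
        have h2 := (hbound m0 (PySem.List.max?_mem hmaxE)).2
        simpa using le_antisymm h2 h1
    refine ⟨((((L.erase ((srt l).getD (2 * k) 0)).erase ((srt l).getD (2 * k) 0)).erase
        ((srt l).getD (l.length - 1 - 2 * k) 0)).erase ((srt l).getD (l.length - 1 - 2 * k) 0)), ?_, ?_⟩
    · rw [hstep, hfold]
      unfold palkaStep
      simp only [hmin, hmax]
      rw [List.range_succ, List.map_append]
      rfl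
    · have p1 := List.Perm.erase ((srt l).getD (l.length - 1 - 2 * k) 0)
        (List.Perm.erase ((srt l).getD (l.length - 1 - 2 * k) 0)
          (List.Perm.erase ((srt l).getD (2 * k) 0)
            (List.Perm.erase ((srt l).getD (2 * k) 0) hperm)))
      have p2 : (((mid l (k + 1) ++ [(srt l).getD (l.length - 1 - 2 * k) 0,
          (srt l).getD (l.length - 1 - 2 * k) 0]).erase ((srt l).getD (l.length - 1 - 2 * k) 0)).erase
            ((srt l).getD (l.length - 1 - 2 * k) 0)).Perm (mid l (k + 1)) := by
        have pc : (mid l (k + 1) ++ [(srt l).getD (l.length - 1 - 2 * k) 0,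
            (srt l).getD (l.length - 1 - 2 * k) 0]).Perm
            ((srt l).getD (l.length - 1 - 2 * k) 0 :: (srt l).getD (l.length - 1 - 2 * k) 0 :: mid l (k + 1)) := by
          simpa using List.perm_append_comm (l₁ := mid l (k + 1))
            (l₂ := [(srt l).getD (l.length - 1 - 2 * k) 0, (srt l).getD (l.length - 1 - 2 * k) 0])
        have p3 := List.Perm.erase ((srt l).getD (l.length - 1 - 2 * k) 0)
          (List.Perm.erase ((srt l).getD (l.length - 1 - 2 * k) 0) pc)
        simpa [List.erase_cons_head] using p3
      have hq : (((((mid l k).erase ((srt l).getD (2 * k) 0)).erase ((srt l).getD (2 * k) 0)).erase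
          ((srt l).getD (l.length - 1 - 2 * k) 0)).erase ((srt l).getD (l.length - 1 - 2 * k) 0)) =
          ((mid l (k + 1) ++ [(srt l).getD (l.length - 1 - 2 * k) 0,
            (srt l).getD (l.length - 1 - 2 * k) 0]).erase ((srt l).getD (l.length - 1 - 2 * k) 0)).erase
              ((srt l).getD (l.length - 1 - 2 * k) 0) := by
        rw [hd]
        rw [List.erase_cons_head, List.erase_cons_head]
      exact p1.trans (hq ▸ p2)

lemma parity_eq (l : List Int) :
    ((l.foldl (fun d v => d.insert v (d.getD v 0 + 1)) (PySem.Dict.empty : PySem.Dict Int Int)).values.any (fun c => c % 2 != 0))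
      = (l.any (fun i => PySem.List.count l i % 2 != 0)) := by
  have h1 := PySem.Dict.foldl_insert_getD_add_one_eq_counter (κ := Int) l
  rw [h1]
  have hv : (PySem.Dict.counter l).values = (PySem.Dict.counter l).items.map Prod.snd := rfl
  rw [Bool.eq_iff_iff]
  simp only [hv, PySem.Dict.items_counter, List.any_map, List.any_eq_true,
    PySem.Set.mem_ofList, Function.comp, PySem.List.count_eq, bne_iff_ne, ne_eq]
  constructor
  · rintro ⟨x, hx, h⟩; exact ⟨x, hx, by omega⟩
  · rintro ⟨x, hx, h⟩; exact ⟨x, hx, by omega⟩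

lemma length_even (l : List Int) (hev : ∀ v, l.count v % 2 = 0) : l.length % 2 = 0 := by
  have h := Multiset.toFinset_sum_count_eq (l : Multiset Int)
  have he : Even (∑ a ∈ (l : Multiset Int).toFinset, Multiset.count a (l : Multiset Int)) := by
    apply Finset.even_sum
    intro c _
    have := hev c
    simp only [Multiset.coe_count]
    rw [Nat.even_iff]
    exact hev c
  rw [h] at he
  simp only [Multiset.coe_card] at he
  rcases he with ⟨m, hm⟩
  omega

lemma length_ge_four (l : List Int) (hPre : Pre_palka l) (hev : ∀ v, l.count v % 2 = 0) :
    4 ≤ l.length := by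
  have hlen := length_even l hev
  rcases l with _ | ⟨a, l⟩
  · exact absurd rfl hPre.1
  rcases l with _ | ⟨b, l⟩
  · simp at hlen
  rcases l with _ | ⟨c, l⟩
  · -- l = [a, b]: evenness of count a forces b = a, excluded by Pre_
    have := hev a
    by_cases hba : b = a
    · exact absurd ⟨rfl, by simp [hba]⟩ hPre.2
    · simp [List.count_cons, hba] at this
  · simp only [List.length_cons] at hlen ⊢
    omega

lemma main_even (l : List Int) (hPre : Pre_palka l) (hev : ∀ v, l.count v % 2 = 0) :
    palka l = palka_alt l := by
  have h4 : 4 ≤ l.length := length_ge_four l hPre hev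
  have hA : (l.any (fun i => PySem.List.count l i % 2 != 0)) = false := by
    simp only [List.any_eq_false, PySem.List.count_eq, bne_iff_ne, ne_eq, Decidable.not_not]
    intro x _
    exact hev x
  have hB := parity_eq l
  rw [hA] at hB
  obtain ⟨L, hfold, -⟩ := loop_inv l hev (l.length / 4) (by omega)
  obtain ⟨j, hj⟩ : ∃ j, l.length / 4 = j + 1 := ⟨l.length / 4 - 1, by omega⟩
  simp only [palka, palka_alt, hA, hB, Bool.false_eq_true, if_false, srt] at hfold ⊢
  rw [hfold]
  rw [show (PySem.List.sorted l (fun y => y)).length = l.length from PySem.List.length_sorted l _ _]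
  rw [hj, List.range_succ_eq_map, List.map_cons]
  simp only [List.any_cons, List.all_cons, List.any_map, List.all_map, Nat.mul_zero,
    Nat.sub_zero, bne_self_eq_false, Bool.false_or, Function.comp, beq_self_eq_true,
    Bool.true_and]
  rw [Bool.eq_iff_iff]
  simp only [Bool.ite_eq_true_distrib, if_true, Bool.and_eq_true, List.any_eq_true,
    List.all_eq_true, List.mem_range, beq_iff_eq, bne_iff_ne, ne_eq, ite_eq_left_iff,
    Bool.false_eq_true, imp_false, Decidable.not_not, not_exists, not_and,
    Nat.succ_eq_add_one, List.mem_map]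
  constructor
  · intro h x hx
    split_ifs at h with hc
    simp only [Function.comp_apply, bne_iff_ne, ne_eq, not_exists, not_and,
      Decidable.not_not] at hc
    have hxx := hc x hx
    simp only [Function.comp_apply, beq_iff_eq]
    exact hxx.symm
  · intro h
    split_ifs with hc
    · obtain ⟨x, hx, hcond⟩ := hc
      simp only [Function.comp_apply, bne_iff_ne, ne_eq] at hcond
      have hxx := h x hx
      simp only [Function.comp_apply, beq_iff_eq] at hxx
      exact hcond hxx.symm

-- ===== VERDICT (by name: the statement is the Claim_ definition above) =====
theorem palka_spec : Claim_equal_palka := by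
  intro l _ hPre
  unfold Spec_palka
  by_cases hev : ∀ v, l.count v % 2 = 0
  · exact (main_even l hPre hev).symm ▸ rfl
  · push_neg at hev
    obtain ⟨v, hv⟩ := hev
    have hvmem : v ∈ l := by
      by_contra h
      rw [List.count_eq_zero_of_not_mem h] at hv
      omega
    have hA : l.any (fun i => PySem.List.count l i % 2 != 0) = true := by
      simp only [List.any_eq_true, PySem.List.count_eq, bne_iff_ne, ne_eq]
      exact ⟨v, hvmem, by omega⟩
    have hB := parity_eq l
    rw [hA] at hB
    simp only [palka, palka_alt, hA, hB]
    rfl
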